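-- pv_equiv track=rewrite | github.com/szuvarska/BScThesis-TextMiningForPoliticalScience | NER and ED/NER_ED_script.py | resolve_entity_labels
-- ===== SOURCE A (Python) =====
-- from collections import defaultdict
-- from collections import defaultdict, Counter
--
-- def resolve_entity_labels(ner_results):
--     entity_dict = defaultdict(lambda: defaultdict(int))
--
--     for entity in ner_results:
--         entity_text = entity['word']
--         entity_label = entity['entity_group']
--         entity_dict[entity_text][entity_label] += 1
--
--     resolved_entities = {}
--     for entity_text, labels in entity_dict.items():
--         resolved_label = max(labels, key=labels.get)
--         resolved_entities[entity_text] = (resolved_label, sum(labels.values()))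
--
--     return resolved_entities
-- ===== SOURCE B (Python) =====
-- def resolve_entity_labels(ner_results):
--     # Group by repeated partitioning: take the first remaining word, gather its
--     # label list, pick the best label by scanning with list.count (strict ">"
--     # keeps the first-seen maximal label), then drop that word and repeat.
--     pairs = [(e['word'], e['entity_group']) for e in ner_results]
--     resolved = {}
--     while pairs:
--         w = pairs[0][0]
--         labels = [l for x, l in pairs if x == w]
--         best, bc = "", 0
--         for l in labels:
--             c = labels.count(l)
--             if bc < c:
--                 best, bc = l, c
--         resolved[w] = (best, len(labels))
--         pairs = [p for p in pairs if p[0] != w]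
--     return resolved
-- ===== Notes on version B (the rewrite author's own statement) =====
-- stated objective: alternative
-- what changed: Replaces A's hash-counting (nested defaultdict of counters, then per-word max/sum) by dict-free repeated partitioning: peel off the first remaining word, gather its label list by filtering, pick the best label by scanning it with list.count under a strict '>' (which keeps the first-seen maximal label, matching max()'s tie-break), record (best, len(labels)), and drop that word from the work list.
import Mathlib
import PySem

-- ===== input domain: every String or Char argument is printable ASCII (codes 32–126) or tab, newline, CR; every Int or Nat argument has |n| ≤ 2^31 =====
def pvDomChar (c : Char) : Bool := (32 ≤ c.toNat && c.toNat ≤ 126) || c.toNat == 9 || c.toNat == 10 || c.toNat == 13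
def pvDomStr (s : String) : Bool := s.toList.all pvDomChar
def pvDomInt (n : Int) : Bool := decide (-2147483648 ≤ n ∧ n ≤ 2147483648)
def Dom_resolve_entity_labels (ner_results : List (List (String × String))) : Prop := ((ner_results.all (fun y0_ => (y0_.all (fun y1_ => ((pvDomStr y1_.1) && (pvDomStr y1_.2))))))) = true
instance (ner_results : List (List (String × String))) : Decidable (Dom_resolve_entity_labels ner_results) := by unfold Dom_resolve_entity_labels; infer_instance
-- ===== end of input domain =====

-- B replaces A's hash counting (nested dict of counters, then per-word max/sum) by dict-free
-- repeated partitioning of the (word,label) list, word by word, choosing the best label by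
-- scanning with list.count (alternative decomposition; the return value is proved identical).

-- ===== PORT A =====
def resolve_entity_labels (ner_results : List (List (String × String))) : List (String × String × Int) :=
  let entity_dict : PySem.Dict String (PySem.Dict String Int) :=
    ner_results.foldl (fun d e =>
      d.insert ((List.lookup "word" e).getD "")
        ((d.getD ((List.lookup "word" e).getD "") PySem.Dict.empty).modify
          ((List.lookup "entity_group" e).getD "") 0 (· + 1))) PySem.Dict.empty
  (entity_dict.items.foldl (fun r p =>
      r.insert p.1 ((PySem.List.max? p.2.keys (fun k => p.2.getD k 0)).getD "", p.2.values.sum))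
    PySem.Dict.empty).items

-- ===== PORT B =====
-- the 'while pairs:' loop of Source B; terminates because the filter drops the head pair
def pvAltGo : List (String × String) → PySem.Dict String (String × Int) → PySem.Dict String (String × Int)
  | [], resolved => resolved
  | (w0, l0) :: t, resolved =>
    let pairs := (w0, l0) :: t
    let w := w0
    let labels := (pairs.filter (fun p => p.1 == w)).map (·.2)
    let best := labels.foldl (fun b l =>
        let c : Int := labels.count l
        if b.2 < c then (l, c) else b) ("", 0)
    pvAltGo (pairs.filter (fun p => !(p.1 == w)))
      (resolved.insert w (best.1, (labels.length : Int)))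
  termination_by pairs _ => pairs.length
  decreasing_by
    simp only [List.filter_cons, beq_self_eq_true, Bool.not_true, List.length_cons]
    exact Nat.lt_succ_of_le (List.length_filter_le _ _)

def resolve_entity_labels_alt (ner_results : List (List (String × String))) : List (String × String × Int) :=
  let pairs := ner_results.map (fun e =>
    ((List.lookup "word" e).getD "", (List.lookup "entity_group" e).getD ""))
  (pvAltGo pairs PySem.Dict.empty).items

-- ===== PRECONDITION & SPEC =====
-- Pre_ excludes exactly the entities missing a 'word' or 'entity_group' key, on which Python A raises KeyError.
def Pre_resolve_entity_labels (ner_results : List (List (String × String))) : Prop :=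
  ∀ e ∈ ner_results, (List.lookup "word" e).isSome = true ∧ (List.lookup "entity_group" e).isSome = true
instance (ner_results : List (List (String × String))) : Decidable (Pre_resolve_entity_labels ner_results) := by
  unfold Pre_resolve_entity_labels; infer_instance
def pvWitness_resolve_entity_labels : (List (List (String × String))) :=
  [[("word", "Poland"), ("entity_group", "LOC")], [("word", "Poland"), ("entity_group", "ORG")]]

def Spec_resolve_entity_labels (ner_results : List (List (String × String))) (out : List (String × String × Int)) : Prop := out = resolve_entity_labels_alt ner_results
instance (ner_results : List (List (String × String))) (out : List (String × String × Int)) : Decidable (Spec_resolve_entity_labels ner_results out) := by unfold Spec_resolve_entity_labels; infer_instance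

-- ===== CLAIM (what is proved, stated in full; the proofs are below) =====
def Claim_equal_resolve_entity_labels : Prop := ∀ (ner_results : List (List (String × String))), Dom_resolve_entity_labels ner_results → Pre_resolve_entity_labels ner_results → Spec_resolve_entity_labels ner_results (resolve_entity_labels ner_results)

-- ===== LEMMAS AND PROOFS =====

-- the (word, label) pair a single entity contributes
def pvWL (e : List (String × String)) : String × String :=
  ((List.lookup "word" e).getD "", (List.lookup "entity_group" e).getD "")

-- A's phase-1 nested dictionary, as a fold over the pair list
def pvPhase1 (ps : List (String × String)) : PySem.Dict String (PySem.Dict String Int) :=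
  ps.foldl (fun d p => d.insert p.1 ((d.getD p.1 PySem.Dict.empty).modify p.2 0 (· + 1)))
    PySem.Dict.empty

-- labels of the entities whose word is w, in order
def pvLabels (ps : List (String × String)) (w : String) : List String :=
  (ps.filter (fun p => p.1 == w)).map (·.2)

-- B's per-word value: best label (strict-greater scan with list.count) and total
def pvVal (L : List String) : String × Int :=
  ((L.foldl (fun b l =>
      let c : Int := L.count l
      if b.2 < c then (l, c) else b) ("", 0)).1, (L.length : Int))

theorem pvSet_add_mem {α : Type} [BEq α] [LawfulBEq α] (s : PySem.Set α) (x : α) (h : x ∈ s) :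
    PySem.Set.add s x = s := by simp [PySem.Set.add, h]

theorem pvSet_add_not_mem {α : Type} [BEq α] [LawfulBEq α] (s : PySem.Set α) (x : α) (h : ¬ x ∈ s) :
    PySem.Set.add s x = s ++ [x] := by simp [PySem.Set.add, h]

theorem pvOfList_append_singleton {α : Type} [BEq α] (xs : List α) (x : α) :
    PySem.Set.ofList (xs ++ [x]) = PySem.Set.add (PySem.Set.ofList xs) x := by
  simp [PySem.Set.ofList, List.foldl_append]

theorem pvMem_labels (ps : List (String × String)) (w l : String) :
    l ∈ pvLabels ps w ↔ (w, l) ∈ ps := by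
  simp only [pvLabels, List.mem_map, List.mem_filter, beq_iff_eq]
  constructor
  · rintro ⟨p, ⟨hp, hw⟩, hl⟩
    have : p = (w, l) := by cases p; simp_all
    exact this ▸ hp
  · intro h; exact ⟨(w, l), ⟨h, rfl⟩, rfl⟩

theorem pvLabels_append (ps : List (String × String)) (p : String × String) (w : String) :
    pvLabels (ps ++ [p]) w = pvLabels ps w ++ (if p.1 = w then [p.2] else []) := by
  by_cases h : p.1 = w <;> simp [pvLabels, List.filter_append, h]

theorem pvPhase1_keys (ps : List (String × String)) :
    (pvPhase1 ps).keys = PySem.Set.ofList (ps.map (·.1)) := by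
  rw [pvPhase1, PySem.Dict.keys_foldl_insert_key ps (·.1)
    (fun d p => (d.getD p.1 PySem.Dict.empty).modify p.2 0 (· + 1)) PySem.Dict.empty]
  rfl

theorem pvPhase1_nodup (ps : List (String × String)) : (pvPhase1 ps).keys.Nodup :=
  PySem.Dict.nodup_keys_foldl_insert_key ps (·.1) _ _ (by simp)

theorem pvPhase1_getD (ps : List (String × String)) (w : String) :
    (pvPhase1 ps).getD w PySem.Dict.empty = PySem.Dict.counter (pvLabels ps w) := by
  rw [pvPhase1]
  induction ps using List.reverseRecOn with
  | nil => rfl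
  | append_singleton ps p ih =>
      rw [List.foldl_append]
      simp only [List.foldl_cons, List.foldl_nil]
      by_cases h : w = p.1
      · subst h
        rw [PySem.Dict.getD_insert]
        simp only [ih]
        rw [pvLabels_append, if_pos rfl]
        simp [PySem.Dict.counter_append_singleton]
      · have hb : (p.1 == w) = false := by
          simp only [beq_eq_false_iff_ne]; exact fun hh => h hh.symm
        rw [PySem.Dict.getD_insert, if_neg h, ih, pvLabels_append,
            if_neg (fun hh => h hh.symm), List.append_nil]

theorem pvMax?_append_singleton {α κ : Type} [LT κ] [DecidableLT κ] (xs : List α) (x : α)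
    (key : α → κ) :
    PySem.List.max? (xs ++ [x]) key
      = match PySem.List.max? xs key with
        | none => some x
        | some m => if key m < key x then some x else some m := by
  unfold PySem.List.max?
  rw [List.foldl_append]
  rfl

-- a set built from a cons: head first, then the deduplicated tail without the head
theorem pvOfList_cons_filter {α : Type} [BEq α] [LawfulBEq α] (w : α) (ws : List α) :
    PySem.Set.ofList (w :: ws) = w :: PySem.Set.ofList (ws.filter (fun x => !(x == w))) := by
  induction ws using List.reverseRecOn with
  | nil => rfl
  | append_singleton ws x ih =>
      rw [show w :: (ws ++ [x]) = (w :: ws) ++ [x] from rfl, pvOfList_append_singleton, ih,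
          List.filter_append]
      by_cases hxw : x = w
      · subst hxw
        have : List.filter (fun y => !(y == x)) [x] = [] := by simp
        rw [this, List.append_nil]
        exact pvSet_add_mem _ _ (List.mem_cons_self)
      · have : List.filter (fun y => !(y == w)) [x] = [x] := by simp [hxw]
        rw [this, pvOfList_append_singleton]
        by_cases hm : x ∈ PySem.Set.ofList (ws.filter (fun y => !(y == w)))
        · rw [pvSet_add_mem _ _ hm,
              pvSet_add_mem (w :: PySem.Set.ofList (ws.filter (fun y => !(y == w)))) x
                (List.mem_cons_of_mem _ hm)]
        · rw [pvSet_add_not_mem _ _ hm,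
              pvSet_add_not_mem (w :: PySem.Set.ofList (ws.filter (fun y => !(y == w)))) x
                (by simp [hxw, hm])]
          rfl

-- the first-seen argmax of a nonempty list, as the strict-greater pair scan
theorem pvMax?_cons (key : String → Int) : ∀ (t : List String) (l0 : String),
    PySem.List.max? (l0 :: t) key
      = some ((t.foldl (fun b l => if b.2 < key l then (l, key l) else b) (l0, key l0)).1) := by
  intro t
  induction t with
  | nil => intro l0; rfl
  | cons x t ih =>
      intro l0
      have hstep : PySem.List.max? (l0 :: x :: t) key
          = PySem.List.max? ((if key l0 < key x then x else l0) :: t) key := by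
        by_cases h : key l0 < key x <;> simp [PySem.List.max?, h]
      rw [hstep, ih]
      by_cases h : key l0 < key x <;> simp [h]

-- the strict-greater scan from ("",0) computes max? when the first key is positive
theorem pvBest_eq_max? (key : String → Int) (l0 : String) (t : List String)
    (hpos : 0 < key l0) :
    ((l0 :: t).foldl (fun b l =>
        let c : Int := key l
        if b.2 < c then (l, c) else b) ("", 0)).1
      = (PySem.List.max? (l0 :: t) key).getD "" := by
  have h1 : (l0 :: t).foldl (fun b l =>
      let c : Int := key l
      if b.2 < c then (l, c) else b) ("", 0)
      = t.foldl (fun b l =>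
          let c : Int := key l
          if b.2 < c then (l, c) else b) (l0, key l0) := by
    simp only [List.foldl_cons]
    rw [if_pos hpos]
  rw [h1, pvMax?_cons key t l0]
  rfl

-- deduplication does not change the first-seen argmax
theorem pvMax?_ofList (key : String → Int) (L : List String) :
    PySem.List.max? (PySem.Set.ofList L) key = PySem.List.max? L key := by
  induction L using List.reverseRecOn with
  | nil => rfl
  | append_singleton L x ih =>
      rw [pvOfList_append_singleton, pvMax?_append_singleton L x key]
      by_cases hm : x ∈ PySem.Set.ofList L
      · rw [pvSet_add_mem _ _ hm, ih]
        have hxL : x ∈ L := (PySem.Set.mem_ofList L x).1 hm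
        cases hM : PySem.List.max? L key with
        | none =>
            exfalso
            have := (PySem.List.max?_eq_none_iff L key).1 hM
            rw [this] at hxL
            exact absurd hxL List.not_mem_nil
        | some m =>
            have hle := PySem.List.max?_isMax hM x hxL
            show some m = if key m < key x then some x else some m
            rw [if_neg (not_lt.mpr hle)]
      · rw [pvSet_add_not_mem _ _ hm, pvMax?_append_singleton _ x key, ih]

-- a list of Nat casts sums to the cast of the Nat sum
theorem pvSum_cast {α : Type} (f : α → Nat) (xs : List α) :
    (xs.map (fun a => ((f a : Nat) : Int))).sum = (((xs.map f).sum : Nat) : Int) := by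
  induction xs with
  | nil => rfl
  | cons x t ih => simp [ih]

-- total over the counter's values = length of the label list
theorem pvCounterSum (L : List String) :
    (PySem.Dict.counter L).values.sum = (L.length : Int) := by
  rw [PySem.Dict.values_eq_map_keys _ (PySem.Dict.nodup_keys_counter L) 0,
      PySem.Dict.keys_counter]
  have hk : (fun k => (PySem.Dict.counter L).getD k 0) = fun k => ((L.count k : Nat) : Int) := by
    funext k; exact PySem.Dict.getD_counter L k
  rw [hk, pvSum_cast]
  congr 1
  have hperm : (PySem.Set.ofList L).Perm L.dedup := by
    rw [List.perm_ext_iff_of_nodup (PySem.Set.nodup_ofList L) L.nodup_dedup]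
    intro a
    rw [PySem.Set.mem_ofList, List.mem_dedup]
  calc ((PySem.Set.ofList L).map L.count).sum
      = (L.dedup.map L.count).sum := List.Perm.sum_eq (hperm.map L.count)
    _ = L.length := List.sum_map_count_dedup_eq_length L

-- filtering out one word leaves the other words' label lists unchanged
theorem pvLabels_filter_ne (ps : List (String × String)) (w w' : String) (h : w' ≠ w) :
    pvLabels (ps.filter (fun p => !(p.1 == w))) w' = pvLabels ps w' := by
  unfold pvLabels
  rw [List.filter_filter]
  congr 1
  apply List.filter_congr
  intro p _
  by_cases hp : p.1 = w'
  · simp [hp, h]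
  · simp [hp]

-- B's loop = a fold of fresh inserts over the distinct words, valued from the full pair list
theorem pvAltGo_eq : ∀ (n : Nat) (ps : List (String × String)), ps.length ≤ n →
    ∀ (r : PySem.Dict String (String × Int)),
    pvAltGo ps r
      = (PySem.Set.ofList (ps.map (·.1))).foldl
          (fun d w => d.insert w (pvVal (pvLabels ps w))) r := by
  intro n
  induction n with
  | zero =>
      intro ps hps r
      have : ps = [] := List.eq_nil_of_length_eq_zero (Nat.le_zero.1 hps)
      subst this
      rw [pvAltGo]
      rfl
  | succ n ih =>
      intro ps hps r
      cases ps with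
      | nil => rw [pvAltGo]; rfl
      | cons hd t =>
          cases hd with
          | mk w0 l0 =>
              show pvAltGo ((w0, l0) :: t) r = _
              rw [pvAltGo]
              have hfilter : ((w0, l0) :: t).filter (fun p => !(p.1 == w0))
                  = t.filter (fun p => !(p.1 == w0)) := by
                simp
              have hlen : (t.filter (fun p => !(p.1 == w0))).length ≤ n := by
                have := List.length_filter_le (fun p => !(p.1 == w0)) t
                have ht : t.length ≤ n := Nat.lt_succ_iff.1 (by simpa using hps)
                omega
              simp only [hfilter]
              rw [ih _ hlen]
              -- the word list of the filtered pairs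
              have hwords : (t.filter (fun p => !(p.1 == w0))).map (·.1)
                  = (t.map (·.1)).filter (fun x => !(x == w0)) := by
                rw [List.filter_map]
                rfl
              have hcons : ((w0, l0) :: t).map (·.1) = w0 :: t.map (·.1) := rfl
              rw [hwords, hcons, pvOfList_cons_filter w0 (t.map (·.1))]
              simp only [List.foldl_cons]
              -- head value: labels of w0 in the full list, strict-greater scan = pvVal
              have hhead : (((((w0, l0) :: t).filter (fun p => p.1 == w0)).map (·.2)).foldl
                  (fun b l =>
                    let c : Int := ((((w0, l0) :: t).filter (fun p => p.1 == w0)).map (·.2)).count l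
                    if b.2 < c then (l, c) else b) ("", 0)).1
                  = (pvVal (pvLabels ((w0, l0) :: t) w0)).1 := rfl
              rw [hhead]
              -- the accumulators agree: same insert of the head word's value
              have hacc : r.insert w0 ((pvVal (pvLabels ((w0, l0) :: t) w0)).1,
                    ((((w0, l0) :: t).filter (fun p => p.1 == w0)).map (·.2)).length)
                  = r.insert w0 (pvVal (pvLabels ((w0, l0) :: t) w0)) := rfl
              rw [hacc]
              -- over the remaining distinct words, labels of filtered = labels of full
              apply PySem.List.foldl_congr_mem
              intro acc w' hw'
              have hne : w' ≠ w0 := by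
                have := (PySem.Set.mem_ofList _ _).1 hw'
                rcases List.mem_filter.1 this with ⟨_, hb⟩
                simpa using hb
              rw [pvLabels_filter_ne t w0 w' hne]
              -- and labels in t = labels in (w0,l0)::t for w' ≠ w0
              have : pvLabels ((w0, l0) :: t) w' = pvLabels t w' := by
                unfold pvLabels
                rw [List.filter_cons]
                simp [Ne.symm hne]
              rw [this]

-- ===== VERDICT (by name: the statement is the Claim_ definition above) =====
theorem resolve_entity_labels_spec : Claim_equal_resolve_entity_labels := by
  intro ner _hdom _hpre
  unfold Spec_resolve_entity_labels resolve_entity_labels resolve_entity_labels_alt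
  set ps := ner.map pvWL with hps
  -- Phase 1 of A is pvPhase1 ps
  have hA1 : ner.foldl (fun d e =>
      d.insert ((List.lookup "word" e).getD "")
        ((d.getD ((List.lookup "word" e).getD "") PySem.Dict.empty).modify
          ((List.lookup "entity_group" e).getD "") 0 (· + 1))) PySem.Dict.empty
      = pvPhase1 ps := by
    rw [hps, pvPhase1, List.foldl_map]
    rfl
  rw [hA1]
  have hB0 : ner.map (fun e =>
      ((List.lookup "word" e).getD "", (List.lookup "entity_group" e).getD "")) = ps := rfl
  rw [hB0]
  dsimp only
  -- flatten A's output fold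
  have hAitems : (pvPhase1 ps).items
      = (PySem.Set.ofList (ps.map (·.1))).map
          (fun w => (w, (pvPhase1 ps).getD w PySem.Dict.empty)) := by
    rw [PySem.Dict.items_eq_map_keys _ (pvPhase1_nodup ps) PySem.Dict.empty, pvPhase1_keys]
  have hAout : ((pvPhase1 ps).items.foldl (fun r p =>
        r.insert p.1 ((PySem.List.max? p.2.keys (fun k => p.2.getD k 0)).getD "", p.2.values.sum))
      PySem.Dict.empty).items
      = (pvPhase1 ps).items.map (fun p =>
          (p.1, (PySem.List.max? p.2.keys (fun k => p.2.getD k 0)).getD "", p.2.values.sum)) := by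
    have := PySem.Dict.items_foldl_insert_fresh (pvPhase1 ps).items (fun p => p.1)
      (fun p => ((PySem.List.max? p.2.keys (fun k => p.2.getD k 0)).getD "", p.2.values.sum))
      PySem.Dict.empty (fun a _ => PySem.Dict.contains_empty a.1) (pvPhase1_nodup ps)
    simpa using this
  rw [hAout, hAitems, List.map_map]
  -- flatten B's loop
  rw [pvAltGo_eq ps.length ps le_rfl PySem.Dict.empty]
  have hBitems : ((PySem.Set.ofList (ps.map (·.1))).foldl
        (fun d w => d.insert w (pvVal (pvLabels ps w))) PySem.Dict.empty).items
      = (PySem.Set.ofList (ps.map (·.1))).map (fun w => (w, pvVal (pvLabels ps w))) := by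
    have := PySem.Dict.items_foldl_insert_fresh (PySem.Set.ofList (ps.map (·.1)))
      (fun w => w) (fun w => pvVal (pvLabels ps w))
      PySem.Dict.empty (fun a _ => PySem.Dict.contains_empty a)
      (by simp [PySem.Set.nodup_ofList (ps.map (·.1))])
    simpa using this
  rw [hBitems]
  -- pointwise over the distinct words
  apply List.map_congr_left
  intro w hw
  simp only [Function.comp]
  -- the labels of w are nonempty
  obtain ⟨p0, hp0, hp0w⟩ : ∃ p ∈ ps, p.1 = w := by
    have h1 := (PySem.Set.mem_ofList _ _).1 hw
    simp only [List.mem_map] at h1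
    obtain ⟨a, ha, haw⟩ := h1
    exact ⟨a, ha, haw⟩
  have hl0 : p0.2 ∈ pvLabels ps w := by
    rw [pvMem_labels]
    have : (w, p0.2) = p0 := by cases p0; simp_all
    exact this ▸ hp0
  set L := pvLabels ps w with hL
  -- A's inner dict
  rw [pvPhase1_getD ps w, PySem.Dict.keys_counter]
  have hkey : (fun k => (PySem.Dict.counter L).getD k 0) = fun k => ((L.count k : Int)) := by
    funext k
    exact PySem.Dict.getD_counter L k
  rw [hkey, pvCounterSum L, pvMax?_ofList (fun k => ((L.count k : Int))) L]
  -- B's value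
  obtain ⟨l0, t, hLt⟩ : ∃ l0 t, L = l0 :: t := by
    cases hc : L with
    | nil => rw [hc] at hl0; exact absurd hl0 List.not_mem_nil
    | cons a b => exact ⟨a, b, rfl⟩
  have hpos : 0 < ((L.count l0 : Nat) : Int) := by
    have : 0 < L.count l0 := List.count_pos_iff.2 (hLt ▸ List.mem_cons_self)
    exact_mod_cast this
  have hval : pvVal L = ((PySem.List.max? L (fun k => ((L.count k : Int)))).getD "",
      (L.length : Int)) := by
    unfold pvVal
    rw [hLt] at hpos ⊢
    rw [pvBest_eq_max? (fun k => (((l0 :: t).count k : Nat) : Int)) l0 t hpos]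
  rw [hval]
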